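-- pv_equiv track=rewrite | github.com/pypi-data/pypi-mirror-182 | packages/MusicOnPolytopes/MusicOnPolytopes-0.1.0-py3-none-any.whl/polytopes/pattern_factory.py | generate_irreg_codes
-- ===== SOURCE A (Python) =====
-- def generate_irreg_codes(dimension, max_irregular_dimension):
--     """
--     Generate codes for irregular polytopes/patterns.
--
--     Generating irregular patterns is made by indexing positions which need to be altered.
--     This is the sense of this function, which will generate all possible codes given a polytope dimension and a maximal deformation dimension.
--     Concretely, all codes are binary numbers, and are constructed to indicate where and how many positions need to be altered.
--     Even though each element in the polytope can be specified by dichotomy (by construction, by concatenating two polytopes when increasing the dimension, see pattern_manip.py),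
--     **the goal of codes here is not to indicate individually each position which need to be altered**.
--
--     - Codes are related to the notion of dimensions in the nesting:
--          - The first element of the code (left element, the first in the list) will encode information about the 2 polytopes of dimension n-1
--          - The second element of the code will encode information about polytopes at the n-2 dimension
--          - The third element of the code will encode information about polytopes at the n-3 dimension
--          - And so on until the last one, which represent information at the last nesting dimension (so directly on elements)
--
--     - As a dichotomy principle, the alteration will be propagated with binary rules at each dimension:
--          - If the current boolean is a 1, this alteration will affect both nested polytopes.
--          - If the current boolean is a 0, this alteration will only affect the second nested polytope, the one "on the right" (geometrically).
--
--     - In that sense, at every dimension, if the current boolean is 0, the code will only be propagated to the 2nd nested polytope, and the 1st nested polytope will be left without alteration.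
--     Otherwise, if it's a 1, the rest of the code will be copied to both polytopes of lower dimension.
--
--     - At the last level, a 0 will indicate to alter only the 2nd polytope (so the element on the right), and a 1 will indicate to alter both.
--     Hence, a code composed of zeroes ([0,0,...,0]) will still alter the last element! To specify "no alteration at all", code must be an empty list.
--
--     In that sense, by dichotomy, we specify, for each dimension, to which part of the nesting alteration should be propagated (both or only the second part).
--     As it is a dichotomy principle, codes have to be of the same length than the dimension of the polytope.
--
--     In addition, the number of "1" in the code define the dimension of the alteration polytope.
--
--     To this instant, I don't have reference with figures to illustrate this principle (apart from the Tutorial Notebook, on the associated folder),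
--     but the construction of irregular polytopes can be better understood by looking at function 'recursive_irregular_construction()'
--
--     Parameters
--     ----------
--     dimension : integer
--         The dimension of the regular polytope.
--         This dimension is also the size of the binary code.
--     max_irregular_dimension : integer
--         The maximal dimension of the irregulairty (included).
--         By contruction, max_irregular_dimension < dim, and, in general, max_irregular_dimension = dim - 2.
--
--     Returns
--     -------
--     to_return : list of binary numbers (as list)
--         Codes which will generate all possible irregularities of given size.
--
--     """
--     form = "{0:0"+str(dimension)+"b}"
--     to_return = [[]]
--     for i in range(2**dimension):
--         binary = form.format(i)
--         if binary.count('1') <= max_irregular_dimension: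
--             to_add = []
--             [to_add.append(int(i)) for i in binary]
--             to_return.append(to_add)
--     return to_return
-- ===== SOURCE B (Python) =====
-- def generate_irreg_codes(dimension, max_irregular_dimension):
--     # Budget-pruned recursion: build each code bit by bit (0 branch before 1
--     # branch, so codes come out in ascending numeric order), carrying the
--     # remaining number of 1s allowed; only codes with popcount <=
--     # max_irregular_dimension are ever generated.
--     def rec(pos, budget, prefix, out):
--         if budget < 0:
--             return
--         if pos == 0:
--             out.append(prefix.copy())
--             return
--         prefix.append(0)
--         rec(pos - 1, budget, prefix, out)
--         prefix[-1] = 1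
--         rec(pos - 1, budget - 1, prefix, out)
--         prefix.pop()
--
--     out = [[]]
--     rec(dimension, max_irregular_dimension, [], out)
--     return out
-- ===== Notes on version B (the rewrite author's own statement) =====
-- stated objective: alternative
-- what changed: B replaces A's enumerate-all-2^dimension-integers-format-and-filter loop with a budget-pruned bit-by-bit recursion that only ever generates the codes with popcount <= max_irregular_dimension, emitting them in the same ascending numeric order.
-- intended difference: For dimension = 0 with max_irregular_dimension >= 0, A returns [[], [0]] because Python formats 0 with width 0 as the one-char string '0', yielding a spurious length-1 code; B returns [[], []] with the empty code as the only length-0 code, which matches the documented invariant that codes have the same length as the dimension. — e.g. on generate_irreg_codes(0, 0): A returns [[], [0]], B returns [[], []]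
import Mathlib
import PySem

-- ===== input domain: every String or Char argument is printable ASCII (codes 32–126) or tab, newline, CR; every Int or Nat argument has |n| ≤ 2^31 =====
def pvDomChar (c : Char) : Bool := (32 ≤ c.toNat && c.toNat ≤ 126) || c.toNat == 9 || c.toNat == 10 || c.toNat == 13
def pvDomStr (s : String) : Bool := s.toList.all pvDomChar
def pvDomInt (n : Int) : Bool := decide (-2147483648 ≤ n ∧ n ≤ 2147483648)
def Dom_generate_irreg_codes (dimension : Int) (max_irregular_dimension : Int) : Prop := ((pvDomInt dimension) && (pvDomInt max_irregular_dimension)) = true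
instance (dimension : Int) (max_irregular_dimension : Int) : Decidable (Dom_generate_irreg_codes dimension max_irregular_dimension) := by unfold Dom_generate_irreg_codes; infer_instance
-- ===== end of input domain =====

-- B replaces A's enumerate-all-2^dimension-integers-format-and-filter loop by a budget-pruned
-- bit-by-bit recursion generating only the admissible codes, in the same ascending order
-- (objective: alternative); for dimension = 0 with max_irregular_dimension ≥ 0 their values
-- differ intentionally (see D_ below).

-- ===== PORT A =====
-- hand port of '{0:0<d>b}'.format(i) (PySem has no format): binary digits of i, msb first
-- ('0' for i = 0), left-padded with '0' up to the width; exact for i, width ≥ 0.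
-- (The fuel argument of pvBinStrF only makes the recursion structural; pvBinStr_eq below
-- shows pvBinStr satisfies the intended recursion.)
def pvBinStrF : Nat → Nat → List Char
  | 0, _ => []
  | fuel + 1, n =>
      if n < 2 then [if n = 1 then '1' else '0']
      else pvBinStrF fuel (n / 2) ++ [if n % 2 = 1 then '1' else '0']

def pvBinStr (n : Nat) : List Char := pvBinStrF (n + 1) n

def pvFormatBin (n width : Nat) : List Char :=
  List.replicate (width - (pvBinStr n).length) '0' ++ pvBinStr n

-- A raises TypeError when dimension < 0 (2**dimension is a float); Pre_ excludes that,
-- so the .toNat below is only ever applied to a nonnegative dimension.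
def generate_irreg_codes (dimension : Int) (max_irregular_dimension : Int) : List (List Int) :=
  let d := dimension.toNat
  (List.range (2 ^ d)).foldl
    (fun to_return i =>
      let binary := pvFormatBin i d
      if ((binary.count '1' : Int) ≤ max_irregular_dimension) then
        -- int(c) on the digits '0'/'1' produced by the format
        to_return ++ [binary.map (fun c => if c = '1' then (1 : Int) else 0)]
      else to_return)
    [[]]

-- ===== PORT B =====
def altRec (pos : Nat) (budget : Int) (pre : List Int) : List (List Int) :=
  if budget < 0 then []
  else match pos with
    | 0 => [pre]
    | p + 1 => altRec p budget (pre ++ [0]) ++ altRec p (budget - 1) (pre ++ [1])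

def generate_irreg_codes_alt (dimension : Int) (max_irregular_dimension : Int) : List (List Int) :=
  [[]] ++ altRec dimension.toNat max_irregular_dimension []

-- ===== PRECONDITION & SPEC =====
-- A raises TypeError for dimension < 0 (2**dimension is a float there); excluded.
def Pre_generate_irreg_codes (dimension : Int) (max_irregular_dimension : Int) : Prop :=
  0 ≤ dimension
instance (dimension : Int) (max_irregular_dimension : Int) : Decidable (Pre_generate_irreg_codes dimension max_irregular_dimension) := by unfold Pre_generate_irreg_codes; infer_instance
def pvWitness_generate_irreg_codes : Int × Int := (3, 1)

-- For dimension = 0 with max_irregular_dimension ≥ 0, A returns [[], [0]] (Python formats 0 with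
-- width 0 as the one-char string '0', yielding a spurious length-1 code) while B returns [[], []]
-- with the empty code as the only length-0 code, matching the documented invariant that codes
-- have the same length as the dimension.
def D_generate_irreg_codes (dimension : Int) (max_irregular_dimension : Int) : Prop :=
  dimension = 0 ∧ 0 ≤ max_irregular_dimension
instance (dimension : Int) (max_irregular_dimension : Int) : Decidable (D_generate_irreg_codes dimension max_irregular_dimension) := by unfold D_generate_irreg_codes; infer_instance

def Spec_generate_irreg_codes (dimension : Int) (max_irregular_dimension : Int) (out : List (List Int)) : Prop := ¬ D_generate_irreg_codes dimension max_irregular_dimension → out = generate_irreg_codes_alt dimension max_irregular_dimension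
instance (dimension : Int) (max_irregular_dimension : Int) (out : List (List Int)) : Decidable (Spec_generate_irreg_codes dimension max_irregular_dimension out) := by unfold Spec_generate_irreg_codes; infer_instance

def pvDiffWitness_generate_irreg_codes : Int × Int := (0, 0)
def pvDiffWitnessOut_generate_irreg_codes : (List (List Int)) × (List (List Int)) := ([[], [0]], [[], []])

-- ===== CLAIM (what is proved, stated in full; the proofs are below) =====
def Claim_unchanged_generate_irreg_codes : Prop := ∀ (dimension : Int) (max_irregular_dimension : Int), Dom_generate_irreg_codes dimension max_irregular_dimension → Pre_generate_irreg_codes dimension max_irregular_dimension → Spec_generate_irreg_codes dimension max_irregular_dimension (generate_irreg_codes dimension max_irregular_dimension)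
def Claim_changed_generate_irreg_codes : Prop := Dom_generate_irreg_codes (pvDiffWitness_generate_irreg_codes.1) (pvDiffWitness_generate_irreg_codes.2) ∧ Pre_generate_irreg_codes (pvDiffWitness_generate_irreg_codes.1) (pvDiffWitness_generate_irreg_codes.2) ∧ D_generate_irreg_codes (pvDiffWitness_generate_irreg_codes.1) (pvDiffWitness_generate_irreg_codes.2) ∧ generate_irreg_codes (pvDiffWitness_generate_irreg_codes.1) (pvDiffWitness_generate_irreg_codes.2) = pvDiffWitnessOut_generate_irreg_codes.1 ∧ generate_irreg_codes_alt (pvDiffWitness_generate_irreg_codes.1) (pvDiffWitness_generate_irreg_codes.2) = pvDiffWitnessOut_generate_irreg_codes.2 ∧ pvDiffWitnessOut_generate_irreg_codes.1 ≠ pvDiffWitnessOut_generate_irreg_codes.2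
def Claim_exact_generate_irreg_codes : Prop := ∀ (dimension : Int) (max_irregular_dimension : Int), Dom_generate_irreg_codes dimension max_irregular_dimension → Pre_generate_irreg_codes dimension max_irregular_dimension → D_generate_irreg_codes dimension max_irregular_dimension → generate_irreg_codes dimension max_irregular_dimension ≠ generate_irreg_codes_alt dimension max_irregular_dimension

-- ===== LEMMAS AND PROOFS =====

theorem pvBinStrF_congr (f : Nat) : ∀ (g n : Nat), n < f → n < g → pvBinStrF f n = pvBinStrF g n := by
  induction f with
  | zero => intro g n h; omega
  | succ f ih =>
      intro g n hf hg
      match g, hg with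
      | g + 1, _ =>
        rw [pvBinStrF, pvBinStrF]
        by_cases h2 : n < 2
        · rw [if_pos h2, if_pos h2]
        · rw [if_neg h2, if_neg h2, ih g (n / 2) (by omega) (by omega)]

theorem pvBinStr_eq (n : Nat) : pvBinStr n =
    if n < 2 then [if n = 1 then '1' else '0']
    else pvBinStr (n / 2) ++ [if n % 2 = 1 then '1' else '0'] := by
  unfold pvBinStr
  rw [pvBinStrF]
  by_cases h2 : n < 2
  · rw [if_pos h2, if_pos h2]
  · rw [if_neg h2, if_neg h2, pvBinStrF_congr n (n / 2 + 1) (n / 2) (by omega) (by omega)]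

-- the mathematical d-bit (msb-first) representation both sides are compared through
def pvBits (d i : Nat) : List Int :=
  match d with
  | 0 => []
  | e + 1 => ((i / 2 ^ e % 2 : Nat) : Int) :: pvBits e (i % 2 ^ e)

theorem pvBits_zero (d : Nat) : pvBits d 0 = List.replicate d 0 := by
  induction d with
  | zero => rfl
  | succ e ih => simp [pvBits, ih, List.replicate_succ]

theorem pvBits_mem (d : Nat) : ∀ i x, x ∈ pvBits d i → x = 0 ∨ x = 1 := by
  induction d with
  | zero => intro i x h; simp [pvBits] at h
  | succ e ih =>
      intro i x h
      simp only [pvBits, List.mem_cons] at h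
      rcases h with h | h
      · subst h; omega
      · exact ih _ _ h

-- lsb-side decomposition of pvBits
theorem pvBits_succ_lsb (d : Nat) : ∀ i, pvBits (d + 1) i = pvBits d (i / 2) ++ [((i % 2 : Nat) : Int)] := by
  induction d with
  | zero =>
      intro i
      show ((i / 2 ^ 0 % 2 : Nat) : Int) :: pvBits 0 (i % 2 ^ 0) = pvBits 0 (i / 2) ++ [((i % 2 : Nat) : Int)]
      simp only [pow_zero, Nat.div_one]
      rfl
  | succ e ih =>
      intro i
      have h1 : i / 2 ^ (e + 1) = i / 2 / 2 ^ e := by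
        rw [Nat.div_div_eq_div_mul, pow_succ, mul_comm]
      have h2 : i % 2 ^ (e + 1) / 2 = i / 2 % 2 ^ e := by
        have : (2 : Nat) ^ (e + 1) = 2 * 2 ^ e := by ring
        rw [this, Nat.mod_mul_right_div_self]
      have h3 : i % 2 ^ (e + 1) % 2 = i % 2 :=
        Nat.mod_mod_of_dvd i (dvd_pow_self 2 (Nat.succ_ne_zero e))
      calc pvBits (e + 2) i
          = ((i / 2 ^ (e + 1) % 2 : Nat) : Int) :: pvBits (e + 1) (i % 2 ^ (e + 1)) := rfl
        _ = ((i / 2 ^ (e + 1) % 2 : Nat) : Int) :: (pvBits e (i % 2 ^ (e + 1) / 2) ++ [((i % 2 ^ (e + 1) % 2 : Nat) : Int)]) := by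
            rw [ih]
        _ = pvBits (e + 1) (i / 2) ++ [((i % 2 : Nat) : Int)] := by
            rw [h1, h2, h3]; rfl

theorem pvBinStr_length_le (d : Nat) : ∀ i, 1 ≤ d → i < 2 ^ d → (pvBinStr i).length ≤ d := by
  induction d with
  | zero => intro i h; omega
  | succ e ih =>
      intro i _ hi
      by_cases h2 : i < 2
      · rw [pvBinStr_eq, if_pos h2]; simp
      · have he : 1 ≤ e := by
          by_contra h
          have : e = 0 := by omega
          subst this; norm_num at hi; omega
        have hdiv : i / 2 < 2 ^ e := by
          rw [Nat.div_lt_iff_lt_mul (by norm_num)]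
          calc i < 2 ^ (e + 1) := hi
            _ = 2 ^ e * 2 := by ring
        rw [pvBinStr_eq, if_neg h2]
        have := ih (i / 2) he hdiv
        simp only [List.length_append, List.length_cons, List.length_nil]
        omega

def pvBitChar (x : Int) : Char := if x = 1 then '1' else '0'

theorem pvFormatBin_eq (d : Nat) : ∀ i, 1 ≤ d → i < 2 ^ d → pvFormatBin i d = (pvBits d i).map pvBitChar := by
  induction d with
  | zero => intro i h; omega
  | succ e ih =>
      intro i _ hi
      by_cases h2 : i < 2
      · have hdiv : i / 2 = 0 := by omega
        have hmod : i % 2 = i := by omega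
        rw [pvBits_succ_lsb, hdiv, hmod, pvBits_zero]
        unfold pvFormatBin
        rw [pvBinStr_eq, if_pos h2]
        have : (if i = 1 then '1' else '0') = pvBitChar (i : Int) := by
          unfold pvBitChar
          interval_cases i <;> simp
        rw [this]
        have h0 : pvBitChar 0 = '0' := rfl
        simp [List.map_replicate, h0]
      · have he : 1 ≤ e := by
          by_contra h
          have : e = 0 := by omega
          subst this; norm_num at hi; omega
        have hdiv : i / 2 < 2 ^ e := by
          rw [Nat.div_lt_iff_lt_mul (by norm_num)]
          calc i < 2 ^ (e + 1) := hi
            _ = 2 ^ e * 2 := by ring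
        have hlen := pvBinStr_length_le e (i / 2) he hdiv
        have hchar : (if i % 2 = 1 then '1' else '0') = pvBitChar ((i % 2 : Nat) : Int) := by
          unfold pvBitChar
          have : i % 2 = 0 ∨ i % 2 = 1 := by omega
          rcases this with h | h <;> rw [h] <;> simp
        rw [pvBits_succ_lsb]
        unfold pvFormatBin
        rw [pvBinStr_eq, if_neg h2]
        have harr : e + 1 - ((pvBinStr (i / 2)).length + 1) = e - (pvBinStr (i / 2)).length := by omega
        calc List.replicate (e + 1 - (pvBinStr (i / 2) ++ [if i % 2 = 1 then '1' else '0']).length) '0'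
              ++ (pvBinStr (i / 2) ++ [if i % 2 = 1 then '1' else '0'])
            = (List.replicate (e - (pvBinStr (i / 2)).length) '0' ++ pvBinStr (i / 2))
              ++ [if i % 2 = 1 then '1' else '0'] := by
              simp only [List.length_append, List.length_cons, List.length_nil, harr,
                List.append_assoc]
          _ = (pvBits e (i / 2)).map pvBitChar ++ [pvBitChar ((i % 2 : Nat) : Int)] := by
              rw [hchar]
              have := ih (i / 2) he hdiv
              unfold pvFormatBin at this
              rw [this]
          _ = ((pvBits e (i / 2) ++ [((i % 2 : Nat) : Int)]).map pvBitChar) := by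
              simp

theorem pvBitsChar_roundtrip (l : List Int) (h : ∀ x ∈ l, x = 0 ∨ x = 1) :
    (l.map pvBitChar).count '1' = l.count 1 ∧
    (l.map pvBitChar).map (fun c => if c = '1' then (1 : Int) else 0) = l := by
  induction l with
  | nil => simp
  | cons a t ih =>
      have ha := h a (by simp)
      have ht := ih (fun x hx => h x (by simp [hx]))
      rcases ha with ha | ha <;> subst ha <;>
        simp [pvBitChar, ht.1, ht.2]

-- B's recursion generates exactly the filtered, bit-decoded range, prefix-appended
theorem altRec_eq (d : Nat) : ∀ (b : Int) (pre : List Int),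
    altRec d b pre =
      ((List.range (2 ^ d)).filter (fun i => (((pvBits d i).count 1 : Int) ≤ b : Bool))).map
        (fun i => pre ++ pvBits d i) := by
  induction d with
  | zero =>
      intro b pre
      by_cases hb : b < 0
      · rw [altRec, if_pos hb]
        simp [pvBits, List.range_one, show ¬((0 : Int) ≤ b) by omega]
      · rw [altRec, if_neg hb]
        simp [pvBits, List.range_one, show ((0 : Int) ≤ b) by omega]
  | succ e ih =>
      intro b pre
      have hsplit : List.range (2 ^ (e + 1)) =
          List.range (2 ^ e) ++ (List.range (2 ^ e)).map (fun x => 2 ^ e + x) := by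
        have : 2 ^ (e + 1) = 2 ^ e + 2 ^ e := by ring
        rw [this, List.range_add]
      have hbits0 : ∀ i ∈ List.range (2 ^ e), pvBits (e + 1) i = 0 :: pvBits e i := by
        intro i hi
        rw [List.mem_range] at hi
        show ((i / 2 ^ e % 2 : Nat) : Int) :: pvBits e (i % 2 ^ e) = _
        rw [Nat.div_eq_of_lt hi, Nat.mod_eq_of_lt hi]
        norm_num
      have hbits1 : ∀ i ∈ List.range (2 ^ e), pvBits (e + 1) (2 ^ e + i) = 1 :: pvBits e i := by
        intro i hi
        rw [List.mem_range] at hi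
        show (((2 ^ e + i) / 2 ^ e % 2 : Nat) : Int) :: pvBits e ((2 ^ e + i) % 2 ^ e) = _
        have hd : (2 ^ e + i) / 2 ^ e = 1 := by
          rw [add_comm, Nat.add_div_right _ (Nat.two_pow_pos e), Nat.div_eq_of_lt hi]
        have hm : (2 ^ e + i) % 2 ^ e = i := by
          rw [Nat.add_mod_left, Nat.mod_eq_of_lt hi]
        rw [hd, hm]
        norm_num
      by_cases hb : b < 0
      · rw [altRec, if_pos hb]
        have : (List.range (2 ^ (e + 1))).filter
            (fun i => (((pvBits (e + 1) i).count 1 : Int) ≤ b : Bool)) = [] := by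
          rw [List.filter_eq_nil_iff]
          intro a _
          simp only [decide_eq_true_eq]
          omega
        rw [this, List.map_nil]
      · rw [altRec, if_neg hb]
        rw [ih b (pre ++ [0]), ih (b - 1) (pre ++ [1]),
          hsplit, List.filter_append, List.map_append, List.filter_map, List.map_map]
        congr 1
        · rw [show (List.range (2 ^ e)).filter
              (fun i => (((pvBits (e + 1) i).count 1 : Int) ≤ b : Bool)) =
            (List.range (2 ^ e)).filter
              (fun i => (((pvBits e i).count 1 : Int) ≤ b : Bool)) from
            List.filter_congr (fun i hi => by rw [hbits0 i hi]; simp)]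
          apply List.map_congr_left
          intro i hi
          rw [List.mem_filter] at hi
          rw [hbits0 i hi.1]
          simp
        · rw [show (List.range (2 ^ e)).filter
              ((fun i => (((pvBits (e + 1) i).count 1 : Int) ≤ b : Bool)) ∘ fun x => 2 ^ e + x) =
            (List.range (2 ^ e)).filter
              (fun i => (((pvBits e i).count 1 : Int) ≤ b - 1 : Bool)) from
            List.filter_congr (fun i hi => by
              simp only [Function.comp_apply]
              rw [hbits1 i hi]
              have hc : List.count 1 (1 :: pvBits e i) = List.count 1 (pvBits e i) + 1 := by simp
              rw [hc, decide_eq_decide]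
              push_cast
              omega)]
          apply List.map_congr_left
          intro i hi
          rw [List.mem_filter] at hi
          simp only [Function.comp_apply]
          rw [hbits1 i hi.1]
          simp

-- ===== VERDICT (by name: the statement is the Claim_ definition above) =====
theorem generate_irreg_codes_spec : Claim_unchanged_generate_irreg_codes := by
  intro dimension m _ hpre hnD
  unfold Pre_generate_irreg_codes at hpre
  unfold D_generate_irreg_codes at hnD
  unfold generate_irreg_codes generate_irreg_codes_alt
  cases hcase : dimension.toNat with
  | zero =>
      have hdim0 : dimension = 0 := by omega
      have hm : m < 0 := by
        by_contra h
        exact hnD ⟨hdim0, by omega⟩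
      have hA : pvFormatBin 0 0 = ['0'] := by
        unfold pvFormatBin
        rw [pvBinStr_eq, if_pos (by norm_num)]
        simp
      show (List.range (2 ^ 0)).foldl
          (fun to_return i =>
            if (((pvFormatBin i 0).count '1' : Int) ≤ m) then
              to_return ++ [(pvFormatBin i 0).map (fun c => if c = '1' then (1 : Int) else 0)]
            else to_return) [[]] = [[]] ++ altRec 0 m []
      rw [altRec, if_pos hm]
      simp [List.range_one, hA, show ¬((0 : Int) ≤ m) by omega]
  | succ e =>
      show (List.range (2 ^ (e + 1))).foldl
          (fun to_return i =>
            if (((pvFormatBin i (e + 1)).count '1' : Int) ≤ m) then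
              to_return ++ [(pvFormatBin i (e + 1)).map (fun c => if c = '1' then (1 : Int) else 0)]
            else to_return) [[]] = [[]] ++ altRec (e + 1) m []
      rw [PySem.List.foldl_append_ite, altRec_eq]
      congr 1
      rw [show (List.range (2 ^ (e + 1))).filter
            (fun i => decide ((List.count '1' (pvFormatBin i (e + 1)) : Int) ≤ m)) =
          (List.range (2 ^ (e + 1))).filter
            (fun i => decide ((List.count 1 (pvBits (e + 1) i) : Int) ≤ m)) from
        List.filter_congr (fun i hi => by
          rw [List.mem_range] at hi
          rw [pvFormatBin_eq (e + 1) i (by omega) hi,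
            (pvBitsChar_roundtrip (pvBits (e + 1) i) (pvBits_mem (e + 1) i)).1])]
      apply List.map_congr_left
      intro i hi
      rw [List.mem_filter, List.mem_range] at hi
      rw [pvFormatBin_eq (e + 1) i (by omega) hi.1]
      simpa using (pvBitsChar_roundtrip (pvBits (e + 1) i) (pvBits_mem (e + 1) i)).2

theorem generate_irreg_codes_changed : Claim_changed_generate_irreg_codes := by
  unfold Claim_changed_generate_irreg_codes; decide

theorem generate_irreg_codes_tight : Claim_exact_generate_irreg_codes := by
  intro dimension m _ _ hD
  obtain ⟨hdim, hm⟩ := hD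
  subst hdim
  unfold generate_irreg_codes generate_irreg_codes_alt
  have hA : pvFormatBin 0 0 = ['0'] := by
    unfold pvFormatBin
    rw [pvBinStr_eq, if_pos (by norm_num)]
    simp
  show (List.range (2 ^ (0 : Int).toNat)).foldl
      (fun to_return i =>
        if (((pvFormatBin i (0 : Int).toNat).count '1' : Int) ≤ m) then
          to_return ++ [(pvFormatBin i (0 : Int).toNat).map (fun c => if c = '1' then (1 : Int) else 0)]
        else to_return) [[]] ≠ [[]] ++ altRec (0 : Int).toNat m []
  rw [show ((0 : Int).toNat) = 0 from rfl, altRec, if_neg (by omega)]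
  simp [List.range_one, hA, show ((0 : Int) ≤ m) by omega]
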